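-- pv_equiv track=rewrite | github.com/Kadir-Akipek/Hackerrank_Solutions | Electronic_shop.py | electronic_shop
-- ===== SOURCE A (Python) =====
-- def electronic_shop(keyboards,drives,b):
--     cost = []
--     for i in keyboards:
--         for j in drives:
--             if (i + j) <= b:
--                 c = i + j
--                 cost.append(c)
--             else:
--                 pass
--
--     if len(cost):
--         return max(cost)
--     else:
--         return -1
-- ===== SOURCE B (Python) =====
-- def electronic_shop(keyboards, drives, b):
--     sd = sorted(drives)
--     best = None
--     for i in keyboards:
--         x = b - i
--         # bisect_right(sd, x) by hand (no imports in this module)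
--         lo, hi = 0, len(sd)
--         while lo < hi:
--             mid = (lo + hi) // 2
--             if x < sd[mid]:
--                 hi = mid
--             else:
--                 lo = mid + 1
--         if lo:
--             cand = i + sd[lo - 1]
--             if best is None or cand > best:
--                 best = cand
--     return -1 if best is None else best
-- ===== Notes on version B (the rewrite author's own statement) =====
-- stated objective: faster
-- what changed: A enumerates all keyboard-drive pairs and collects affordable sums into a list before taking max; B sorts the drives once and, for each keyboard, binary-searches (hand-written bisect_right) for the most expensive affordable drive, tracking the running best sum.
import Mathlib
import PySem

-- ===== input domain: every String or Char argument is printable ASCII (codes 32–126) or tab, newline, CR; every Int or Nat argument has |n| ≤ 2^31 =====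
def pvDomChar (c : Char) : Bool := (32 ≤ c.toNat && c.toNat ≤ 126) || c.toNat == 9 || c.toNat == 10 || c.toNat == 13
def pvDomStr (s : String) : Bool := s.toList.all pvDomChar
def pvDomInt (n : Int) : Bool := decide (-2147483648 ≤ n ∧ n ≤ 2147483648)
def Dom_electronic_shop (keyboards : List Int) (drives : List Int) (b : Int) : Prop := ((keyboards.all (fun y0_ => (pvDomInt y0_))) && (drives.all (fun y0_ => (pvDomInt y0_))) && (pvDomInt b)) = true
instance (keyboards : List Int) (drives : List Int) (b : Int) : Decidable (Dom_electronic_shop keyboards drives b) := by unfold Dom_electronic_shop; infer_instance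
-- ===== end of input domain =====

-- B replaces A's quadratic scan over all keyboard/drive pairs by sorting the drives once and
-- binary-searching the best affordable drive per keyboard (objective: faster, asymptotic).

-- ===== PORT A =====
def electronic_shop (keyboards : List Int) (drives : List Int) (b : Int) : Int :=
  let cost := keyboards.foldl (fun acc i =>
      drives.foldl (fun acc2 j => if i + j ≤ b then acc2 ++ [i + j] else acc2) acc) []
  if cost.length ≠ 0 then (PySem.List.max? cost (fun y => y)).getD (-1) else -1

-- ===== PORT B =====
-- Source B's hand-written while-loop (no imports allowed in that module) is exactly bisect_right,
-- which PySem owns as PySem.List.bisectRight.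
def electronic_shop_alt (keyboards : List Int) (drives : List Int) (b : Int) : Int :=
  let sd := PySem.List.sorted drives (fun y => y)
  let best := keyboards.foldl (fun best i =>
      let x := b - i
      let lo := PySem.List.bisectRight sd x
      if lo ≠ 0 then
        let cand := i + sd.getD (lo - 1) 0
        match best with
        | none => some cand
        | some bv => if cand > bv then some cand else some bv
      else best) (none : Option Int)
  match best with
  | none => -1
  | some bv => bv

-- ===== PRECONDITION & SPEC =====
def Spec_electronic_shop (keyboards : List Int) (drives : List Int) (b : Int) (out : Int) : Prop := out = electronic_shop_alt keyboards drives b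
instance (keyboards : List Int) (drives : List Int) (b : Int) (out : Int) : Decidable (Spec_electronic_shop keyboards drives b out) := by unfold Spec_electronic_shop; infer_instance

-- ===== CLAIM (what is proved, stated in full; the proofs are below) =====
def Claim_equal_electronic_shop : Prop := ∀ (keyboards : List Int) (drives : List Int) (b : Int), Dom_electronic_shop keyboards drives b → Spec_electronic_shop keyboards drives b (electronic_shop keyboards drives b)

-- ===== LEMMAS AND PROOFS =====

-- the running-max step shared by max? (key = id) and B's `best` update
def pvStep (acc : Option Int) (x : Int) : Option Int :=
  match acc with
  | none => some x
  | some m => if m < x then some x else some m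

theorem pvStep_some (a x : Int) : pvStep (some a) x = some (max a x) := by
  simp only [pvStep, max_def]
  split_ifs <;> (congr 1 <;> omega)

theorem foldl_max_comm (t : List Int) (a x : Int) :
    t.foldl max (max a x) = max a (t.foldl max x) := by
  induction t generalizing x with
  | nil => rfl
  | cons y t ih =>
    simp only [List.foldl_cons, max_assoc]
    exact ih (max x y)

theorem foldl_pvStep_some (l : List Int) (a : Int) :
    l.foldl pvStep (some a) = some (l.foldl max a) := by
  induction l generalizing a with
  | nil => rfl
  | cons x t ih => simp only [List.foldl_cons, pvStep_some, ih]

theorem max?_id_eq_foldl_pvStep (l : List Int) :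
    PySem.List.max? l (fun y => y) = l.foldl pvStep none := by
  cases l with
  | nil => rfl
  | cons x t =>
    rw [PySem.List.max?_id_cons]
    simp only [List.foldl_cons, pvStep, foldl_pvStep_some]

theorem foldl_pvStep_eq (l : List Int) (o : Option Int) :
    l.foldl pvStep o =
      match PySem.List.max? l (fun y => y) with
      | none => o
      | some m => pvStep o m := by
  cases l with
  | nil => rfl
  | cons x t =>
    rw [PySem.List.max?_id_cons]
    cases o with
    | none =>
      simp only [List.foldl_cons, pvStep, foldl_pvStep_some]
    | some a =>
      simp only [List.foldl_cons, pvStep_some, foldl_pvStep_some, foldl_max_comm]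

theorem max?_id_eq_of {l : List Int} {m : Int} (h1 : m ∈ l) (h2 : ∀ y ∈ l, y ≤ m) :
    PySem.List.max? l (fun y => y) = some m := by
  rcases h : PySem.List.max? l (fun y => y) with _ | m'
  · rw [PySem.List.max?_eq_none_iff] at h; subst h; cases h1
  · have hmem := PySem.List.max?_mem h
    have hmax := PySem.List.max?_isMax h
    have := le_antisymm (h2 m' hmem) (hmax m h1)
    simp [this]

-- the per-keyboard candidate list of A
def pvL (drives : List Int) (b i : Int) : List Int :=
  ((drives.filter (fun j => decide (i + j ≤ b))).map (fun j => i + j))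

theorem inner_fold_A (drives : List Int) (b i : Int) (acc : List Int) :
    drives.foldl (fun acc2 j => if i + j ≤ b then acc2 ++ [i + j] else acc2) acc
      = acc ++ pvL drives b i := by
  have h : (fun (acc2 : List Int) (j : Int) => if i + j ≤ b then acc2 ++ [i + j] else acc2)
      = (fun acc2 j => if (decide (i + j ≤ b)) = true then acc2 ++ [i + j] else acc2) := by
    funext acc2 j; simp
  rw [h, PySem.List.foldl_append_if]
  rfl

-- per-keyboard step of B, as written in the port
def pvBStep (drives : List Int) (b : Int) (best : Option Int) (i : Int) : Option Int :=
  let sd := PySem.List.sorted drives (fun y => y)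
  let lo := PySem.List.bisectRight sd (b - i)
  if lo ≠ 0 then pvStep best (i + sd.getD (lo - 1) 0) else best

-- KEY LEMMA: folding A's candidates for one keyboard equals B's bisect step
theorem per_keyboard (drives : List Int) (b i : Int) (o : Option Int) :
    (pvL drives b i).foldl pvStep o = pvBStep drives b o i := by
  have hsd := PySem.List.sorted_pairwise drives (fun y => y)
  obtain ⟨hle, hlt, hgt⟩ := PySem.List.bisectRight_spec (PySem.List.sorted drives (fun y => y)) (b - i) hsd
  set sd := PySem.List.sorted drives (fun y => y) with hsddef
  set lo := PySem.List.bisectRight sd (b - i) with hlodef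
  by_cases h0 : lo = 0
  · -- no affordable drive: every element of sd exceeds b - i, so pvL is empty
    have hempty : pvL drives b i = [] := by
      rw [pvL, List.filter_eq_nil_iff.mpr, List.map_nil]
      intro j hj
      have hj' : j ∈ sd := (PySem.List.mem_sorted drives (fun y => y) false j).mpr hj
      obtain ⟨k, hk, hkj⟩ := List.mem_iff_getElem.mp hj'
      have := hgt k hk (by omega)
      simp only [decide_eq_true_eq]
      omega
    rw [hempty]
    simp [pvBStep, ← hsddef, ← hlodef, h0]
  · -- lo > 0: sd[lo-1] is the best affordable drive
    have hlo1 : lo - 1 < sd.length := by omega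
    have hmax : PySem.List.max? (pvL drives b i) (fun y => y) = some (i + sd[lo - 1]) := by
      apply max?_id_eq_of
      · have hmemsd : sd[lo - 1] ∈ sd := List.getElem_mem hlo1
        have hmemdr : sd[lo - 1] ∈ drives := (PySem.List.mem_sorted drives (fun y => y) false _).mp hmemsd
        have hok : sd[lo - 1] ≤ b - i := hlt (lo - 1) hlo1 (by omega)
        exact List.mem_map_of_mem (List.mem_filter.mpr ⟨hmemdr, by simp; omega⟩)
      · intro y hy
        obtain ⟨j, hjf, rfl⟩ := List.mem_map.mp hy
        have hjmem := List.mem_filter.mp hjf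
        have hjle : i + j ≤ b := by simpa using hjmem.2
        have hjsd : j ∈ sd := (PySem.List.mem_sorted drives (fun y => y) false j).mpr hjmem.1
        obtain ⟨k, hk, hkj⟩ := List.mem_iff_getElem.mp hjsd
        by_cases hklo : k < lo
        · have : sd[k] ≤ sd[lo - 1] := PySem.List.sorted_id_getElem_mono drives (by omega) hlo1
          omega
        · have := hgt k hk (by omega)
          omega
    rw [foldl_pvStep_eq, hmax]
    have hgetD : sd.getD (lo - 1) 0 = sd[lo - 1] := List.getD_eq_getElem sd 0 hlo1
    simp only [pvBStep]
    rw [← hsddef, ← hlodef, if_pos h0, hgetD]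

theorem outer_fold (keyboards drives : List Int) (b : Int) (acc : List Int) :
    PySem.List.max?
        (keyboards.foldl (fun acc i =>
          drives.foldl (fun acc2 j => if i + j ≤ b then acc2 ++ [i + j] else acc2) acc) acc)
        (fun y => y)
      = keyboards.foldl (pvBStep drives b) (PySem.List.max? acc (fun y => y)) := by
  induction keyboards generalizing acc with
  | nil => rfl
  | cons i kb ih =>
    simp only [List.foldl_cons]
    rw [inner_fold_A, ih]
    congr 1
    rw [max?_id_eq_foldl_pvStep, List.foldl_append, ← max?_id_eq_foldl_pvStep]
    rw [foldl_pvStep_eq, ← per_keyboard]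
    rw [foldl_pvStep_eq]

-- ===== VERDICT (by name: the statement is the Claim_ definition above) =====
theorem electronic_shop_spec : Claim_equal_electronic_shop := by
  intro keyboards drives b _
  unfold Spec_electronic_shop electronic_shop electronic_shop_alt
  have houter := outer_fold keyboards drives b []
  rw [show (PySem.List.max? ([] : List Int) (fun y => y)) = none from rfl] at houter
  have hB : (fun (best : Option Int) (i : Int) =>
      let x := b - i
      let lo := PySem.List.bisectRight (PySem.List.sorted drives (fun y => y)) x
      if lo ≠ 0 then
        let cand := i + (PySem.List.sorted drives (fun y => y)).getD (lo - 1) 0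
        match best with
        | none => some cand
        | some bv => if cand > bv then some cand else some bv
      else best) = pvBStep drives b := by
    funext best i
    simp only [pvBStep, pvStep]
  simp only [hB]
  rw [← houter]
  set cost := keyboards.foldl (fun acc i =>
      drives.foldl (fun acc2 j => if i + j ≤ b then acc2 ++ [i + j] else acc2) acc) ([] : List Int) with hcost
  by_cases hnil : cost = []
  · simp [hnil, PySem.List.max?]
  · have hlen : cost.length ≠ 0 := by simpa [List.length_eq_zero_iff] using hnil
    rcases h : PySem.List.max? cost (fun y => y) with _ | m
    · rw [PySem.List.max?_eq_none_iff] at h; exact absurd h hnil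
    · simp [hlen]
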